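-- pv_equiv track=rewrite | github.com/EdwinDouB/Fimile-Tweak | utils/routes.py | normalize_tracking_ids
-- ===== SOURCE A (Python) =====
-- from collections import Counter
--
-- def normalize_tracking_ids(raw_ids: list[str], uppercase: bool = False) -> tuple[list[str], list[str], Counter]:
--     cleaned: list[str] = []
--     for value in raw_ids:
--         item = str(value).strip()
--         if not item:
--             continue
--         cleaned.append(item.upper() if uppercase else item)
--
--     counter = Counter(cleaned)
--     unique_ids: list[str] = []
--     seen: set[str] = set()
--     for item in cleaned:
--         if item not in seen:
--             seen.add(item)
--             unique_ids.append(item)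
--     return cleaned, unique_ids, counter
-- ===== SOURCE B (Python) =====
-- from collections import Counter
--
-- def normalize_tracking_ids(raw_ids: list[str], uppercase: bool = False) -> tuple[list[str], list[str], Counter]:
--     # Single pass: the counter itself detects first occurrences, no seen set.
--     cleaned: list[str] = []
--     unique_ids: list[str] = []
--     counter: Counter = Counter()
--     for value in raw_ids:
--         item = str(value).strip()
--         if not item:
--             continue
--         if uppercase:
--             item = item.upper()
--         if counter[item] == 0:
--             unique_ids.append(item)
--         counter[item] = counter[item] + 1
--         cleaned.append(item)
--     return cleaned, unique_ids, counter
-- ===== Notes on version B (the rewrite author's own statement) =====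
-- stated objective: alternative
-- what changed: Fuses A's three passes (cleaning loop, Counter(cleaned), and a dedup loop with a separate seen set) into one loop in which the counter itself detects first occurrences, eliminating the seen set and the extra traversals.
import Mathlib
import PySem

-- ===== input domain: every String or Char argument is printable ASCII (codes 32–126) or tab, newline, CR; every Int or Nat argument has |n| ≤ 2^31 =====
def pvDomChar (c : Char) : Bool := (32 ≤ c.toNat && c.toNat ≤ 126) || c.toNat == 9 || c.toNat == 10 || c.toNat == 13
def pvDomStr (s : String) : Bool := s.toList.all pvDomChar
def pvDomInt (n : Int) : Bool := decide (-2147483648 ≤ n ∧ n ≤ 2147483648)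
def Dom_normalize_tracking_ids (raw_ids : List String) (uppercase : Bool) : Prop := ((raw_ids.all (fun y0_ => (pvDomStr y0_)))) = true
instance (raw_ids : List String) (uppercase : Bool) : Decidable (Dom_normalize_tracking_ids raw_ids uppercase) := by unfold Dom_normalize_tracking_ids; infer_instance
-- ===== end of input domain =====

-- B fuses A's three passes (clean, Counter(cleaned), dedup-with-seen-set) into one loop
-- in which the counter itself detects first occurrences (objective: alternative).

-- ===== PORT A =====
def normalize_tracking_ids (raw_ids : List String) (uppercase : Bool) : List String × List String × (List (String × Int)) :=
  let cleaned := raw_ids.foldl (fun acc value =>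
    let item := PySem.Str.strip value
    if item = "" then acc
    else acc ++ [if uppercase then PySem.Str.upper item else item]) []
  let counter := PySem.Dict.counter cleaned
  let su := cleaned.foldl (fun (p : PySem.Set String × List String) item =>
    if PySem.Set.contains p.1 item then p
    else (PySem.Set.add p.1 item, p.2 ++ [item])) (PySem.Set.empty, [])
  (cleaned, su.2, counter.items)

-- ===== PORT B =====
def normalize_tracking_ids_alt (raw_ids : List String) (uppercase : Bool) : List String × List String × (List (String × Int)) :=
  let st := raw_ids.foldl
    (fun (st : List String × List String × PySem.Dict String Int) value =>
      let item := PySem.Str.strip value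
      if item = "" then st
      else
        let item := if uppercase then PySem.Str.upper item else item
        let u := if st.2.2.getD item 0 == 0 then st.2.1 ++ [item] else st.2.1
        (st.1 ++ [item], u, st.2.2.insert item (st.2.2.getD item 0 + 1)))
    ([], [], PySem.Dict.empty)
  (st.1, st.2.1, st.2.2.items)

-- ===== PRECONDITION & SPEC =====
def Spec_normalize_tracking_ids (raw_ids : List String) (uppercase : Bool) (out : List String × List String × (List (String × Int))) : Prop := out = normalize_tracking_ids_alt raw_ids uppercase
instance (raw_ids : List String) (uppercase : Bool) (out : List String × List String × (List (String × Int))) : Decidable (Spec_normalize_tracking_ids raw_ids uppercase out) := by unfold Spec_normalize_tracking_ids; infer_instance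

-- ===== CLAIM (what is proved, stated in full; the proofs are below) =====
def Claim_equal_normalize_tracking_ids : Prop := ∀ (raw_ids : List String) (uppercase : Bool), Dom_normalize_tracking_ids raw_ids uppercase → Spec_normalize_tracking_ids raw_ids uppercase (normalize_tracking_ids raw_ids uppercase)

-- ===== LEMMAS AND PROOFS =====

-- the per-element cleaning function shared by both loops
def pvClean (uppercase : Bool) (value : String) : Option String :=
  let item := PySem.Str.strip value
  if item = "" then none
  else some (if uppercase then PySem.Str.upper item else item)

-- A's cleaning loop from any accumulator is append-of-filterMap
theorem cleanA_eq (uppercase : Bool) : ∀ (raw : List String) (acc : List String),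
    raw.foldl (fun acc value =>
      let item := PySem.Str.strip value
      if item = "" then acc
      else acc ++ [if uppercase then PySem.Str.upper item else item]) acc
      = acc ++ raw.filterMap (pvClean uppercase) := by
  intro raw
  induction raw with
  | nil => intro acc; simp
  | cons v raw ih =>
    intro acc
    by_cases h : PySem.Str.strip v = ""
    · have hp : pvClean uppercase v = none := by simp [pvClean, h]
      simp [List.foldl_cons, h, hp, ih]
    · have hp : pvClean uppercase v
          = some (if uppercase then PySem.Str.upper (PySem.Str.strip v) else PySem.Str.strip v) := by
        simp [pvClean, h]
      simp [List.foldl_cons, h, hp, ih]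

-- B's loop splits into cleaned-append and a fused (unique, counter) fold over the cleaned items
theorem foldB_eq (uppercase : Bool) : ∀ (raw : List String)
    (c u : List String) (d : PySem.Dict String Int),
    raw.foldl
      (fun (st : List String × List String × PySem.Dict String Int) value =>
        let item := PySem.Str.strip value
        if item = "" then st
        else
          let item := if uppercase then PySem.Str.upper item else item
          let u := if st.2.2.getD item 0 == 0 then st.2.1 ++ [item] else st.2.1
          (st.1 ++ [item], u, st.2.2.insert item (st.2.2.getD item 0 + 1)))
      (c, u, d)
      = (c ++ raw.filterMap (pvClean uppercase),
         (raw.filterMap (pvClean uppercase)).foldl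
           (fun (p : List String × PySem.Dict String Int) item =>
             (if p.2.getD item 0 == 0 then p.1 ++ [item] else p.1,
              p.2.insert item (p.2.getD item 0 + 1))) (u, d)) := by
  intro raw
  induction raw with
  | nil => intro c u d; simp
  | cons v raw ih =>
    intro c u d
    by_cases h : PySem.Str.strip v = ""
    · have hp : pvClean uppercase v = none := by simp [pvClean, h]
      rw [List.foldl_cons, List.filterMap_cons, hp]
      simpa [h] using ih c u d
    · have hp : pvClean uppercase v
          = some (if uppercase then PySem.Str.upper (PySem.Str.strip v) else PySem.Str.strip v) := by
        simp [pvClean, h]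
      rw [List.foldl_cons, List.filterMap_cons, hp, List.foldl_cons]
      simpa [h] using ih
        (c ++ [if uppercase then PySem.Str.upper (PySem.Str.strip v) else PySem.Str.strip v])
        (if d.getD (if uppercase then PySem.Str.upper (PySem.Str.strip v) else PySem.Str.strip v) 0 == 0
          then u ++ [if uppercase then PySem.Str.upper (PySem.Str.strip v) else PySem.Str.strip v] else u)
        (d.insert (if uppercase then PySem.Str.upper (PySem.Str.strip v) else PySem.Str.strip v)
          (d.getD (if uppercase then PySem.Str.upper (PySem.Str.strip v) else PySem.Str.strip v) 0 + 1))

-- the second component of the fused fold is the insert-style counter fold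
theorem fused_snd (L : List String) : ∀ (u : List String) (d : PySem.Dict String Int),
    (L.foldl
      (fun (p : List String × PySem.Dict String Int) item =>
        (if p.2.getD item 0 == 0 then p.1 ++ [item] else p.1,
         p.2.insert item (p.2.getD item 0 + 1))) (u, d)).2
      = L.foldl (fun d x => d.insert x (d.getD x 0 + 1)) d := by
  induction L with
  | nil => intro u d; rfl
  | cons x L ih => intro u d; simp only [List.foldl_cons]; exact ih _ _

-- the first component of the fused fold equals A's dedup-with-seen-set loop,
-- given the invariant linking the seen set and the counter
theorem fused_fst (L : List String) : ∀ (seen : PySem.Set String) (u : List String)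
    (d : PySem.Dict String Int),
    (∀ s : String, (s ∈ seen → 1 ≤ d.getD s 0) ∧ (s ∉ seen → d.getD s 0 = 0)) →
    (L.foldl (fun (p : PySem.Set String × List String) item =>
        if PySem.Set.contains p.1 item then p
        else (PySem.Set.add p.1 item, p.2 ++ [item])) (seen, u)).2
      = (L.foldl
          (fun (p : List String × PySem.Dict String Int) item =>
            (if p.2.getD item 0 == 0 then p.1 ++ [item] else p.1,
             p.2.insert item (p.2.getD item 0 + 1))) (u, d)).1 := by
  induction L with
  | nil => intro seen u d _; rfl
  | cons x L ih =>
    intro seen u d hinv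
    simp only [List.foldl_cons]
    by_cases hx : x ∈ seen
    · have h1 : 1 ≤ d.getD x 0 := (hinv x).1 hx
      have hc : PySem.Set.contains seen x = true := (PySem.Set.contains_iff seen x).mpr hx
      have hz : (d.getD x 0 == 0) = false := by
        simp only [beq_eq_false_iff_ne]; omega
      rw [hc, hz]
      simp only [if_true]
      refine ih seen u (d.insert x (d.getD x 0 + 1)) ?_
      intro s
      refine ⟨fun hs => ?_, fun hs => ?_⟩
      · rw [PySem.Dict.getD_insert]
        by_cases hsx : s = x
        · simp only [hsx, if_true]; omega
        · simp only [hsx, if_false]; exact (hinv s).1 hs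
      · have hsx : s ≠ x := fun he => hs (he ▸ hx)
        rw [PySem.Dict.getD_insert, if_neg hsx]
        exact (hinv s).2 hs
    · have h0 : d.getD x 0 = 0 := (hinv x).2 hx
      have hc : PySem.Set.contains seen x = false := by
        rw [Bool.eq_false_iff]
        intro hcon
        exact hx ((PySem.Set.contains_iff seen x).mp hcon)
      have hz : (d.getD x 0 == 0) = true := by simp [h0]
      rw [hc, hz]
      simp only [if_false, if_true, Bool.false_eq_true]
      refine ih (PySem.Set.add seen x) (u ++ [x]) (d.insert x (d.getD x 0 + 1)) ?_
      intro s
      refine ⟨fun hs => ?_, fun hs => ?_⟩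
      · rw [PySem.Set.mem_add] at hs
        rw [PySem.Dict.getD_insert]
        by_cases hsx : s = x
        · simp only [hsx, if_true]; omega
        · simp only [hsx, if_false]
          exact (hinv s).1 (hs.resolve_right hsx)
      · rw [PySem.Set.mem_add] at hs
        have h1 : s ∉ seen := fun m => hs (Or.inl m)
        have h2 : s ≠ x := fun e => hs (Or.inr e)
        rw [PySem.Dict.getD_insert, if_neg h2]
        exact (hinv s).2 h1

-- ===== VERDICT (by name: the statement is the Claim_ definition above) =====
theorem normalize_tracking_ids_spec : Claim_equal_normalize_tracking_ids := by
  intro raw_ids uppercase _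
  show _ = _
  unfold normalize_tracking_ids normalize_tracking_ids_alt
  rw [foldB_eq uppercase raw_ids [] [] PySem.Dict.empty]
  rw [cleanA_eq uppercase raw_ids []]
  simp only [List.nil_append]
  refine Prod.ext rfl (Prod.ext ?_ ?_)
  · exact fused_fst (raw_ids.filterMap (pvClean uppercase)) PySem.Set.empty [] PySem.Dict.empty
      (by intro s; constructor
          · intro hs; cases hs
          · intro _; simp [PySem.Dict.getD_empty])
  · show (PySem.Dict.counter _).items = _
    rw [fused_snd, PySem.Dict.foldl_insert_getD_add_one_eq_counter]
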